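-- pv_equiv track=rewrite | github.com/nlpcui/AdaptiveQG | foo.py | build_memory_update_mask
-- ===== SOURCE A (Python) =====
-- def build_memory_update_mask(data):
--     memory_update_mask = [
--         [0 for i in range(len(data['word_ids']))] for j in range(len(data['word_ids']))]
--     for column_id in range(len(data['sep_indices'])):
--         if data['sep_indices'][column_id] == 0:
--             continue
--
--         memory_update_mask[column_id][column_id] = 1
--
--         for row_id in range(column_id):
--             if data['sep_indices'][row_id] == 1:
--                 memory_update_mask[row_id][column_id] = 1
--
--     return memory_update_mask
-- ===== SOURCE B (Python) =====
-- def build_memory_update_mask(data):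
--     word_ids = data['word_ids']
--     sep_indices = data['sep_indices']
--     n = len(word_ids)
--     mask = [[0] * n for _ in range(n)]
--     active_rows = [i for i in range(len(sep_indices)) if sep_indices[i] == 1]
--     for j in range(len(sep_indices)):
--         if sep_indices[j] != 0:
--             mask[j][j] = 1
--             for i in active_rows:
--                 if i >= j:
--                     break
--                 mask[i][j] = 1
--     return mask
-- ===== Notes on version B (the rewrite author's own statement) =====
-- stated objective: faster
-- what changed: B precomputes the list of active row indices (sep==1) once and, for each nonzero column j, writes only the active rows below j with an early break, instead of A's per-column rescan of all rows 0..j-1.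
import Mathlib
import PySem

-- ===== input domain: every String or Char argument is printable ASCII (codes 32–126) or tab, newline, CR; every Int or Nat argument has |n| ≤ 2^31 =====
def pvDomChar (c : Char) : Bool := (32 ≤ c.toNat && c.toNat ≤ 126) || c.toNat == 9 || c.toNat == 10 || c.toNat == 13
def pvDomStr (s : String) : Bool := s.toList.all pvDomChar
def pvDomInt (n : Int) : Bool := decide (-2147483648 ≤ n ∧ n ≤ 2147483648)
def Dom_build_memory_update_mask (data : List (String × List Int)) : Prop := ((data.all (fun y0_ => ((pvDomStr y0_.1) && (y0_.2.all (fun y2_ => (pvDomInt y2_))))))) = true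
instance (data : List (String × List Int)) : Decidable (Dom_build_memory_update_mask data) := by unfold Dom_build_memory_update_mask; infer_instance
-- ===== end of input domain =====

-- B precomputes the list of active rows (sep==1) once and, per nonzero column j, writes only the
-- active rows below j (stopping early), instead of A's rescan of all rows 0..j-1 for every column.

-- shared write primitive: mask[r][c] = 1 (in range under Pre_)
def bmumSet (m : List (List Int)) (r c : Nat) : List (List Int) :=
  m.modify r (fun row => row.set c 1)

-- ===== PORT A =====
def build_memory_update_mask (data : List (String × List Int)) : List (List Int) :=
  let wid := (List.lookup "word_ids" data).getD []
  let sep := (List.lookup "sep_indices" data).getD []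
  let n := wid.length
  let m0 := List.replicate n (List.replicate n (0 : Int))
  (List.range sep.length).foldl
    (fun m column_id =>
      if sep.getD column_id 0 == 0 then m
      else
        (List.range column_id).foldl
          (fun acc row_id => if sep.getD row_id 0 == 1 then bmumSet acc row_id column_id else acc)
          (bmumSet m column_id column_id))
    m0

-- ===== PORT B =====
-- inner loop of B: for i in active_rows: if i >= j: break; mask[i][j] = 1
def bmumInner (j : Nat) (active : List Nat) (m : List (List Int)) : List (List Int) :=
  match active with
  | [] => m
  | i :: rest => if j ≤ i then m else bmumInner j rest (bmumSet m i j)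

def build_memory_update_mask_alt (data : List (String × List Int)) : List (List Int) :=
  let wid := (List.lookup "word_ids" data).getD []
  let sep := (List.lookup "sep_indices" data).getD []
  let n := wid.length
  let mask := List.replicate n (List.replicate n (0 : Int))
  let active := (List.range sep.length).filter (fun i => sep.getD i 0 == 1)
  (List.range sep.length).foldl
    (fun m j => if sep.getD j 0 != 0 then bmumInner j active (bmumSet m j j) else m)
    mask

-- ===== PRECONDITION & SPEC =====
-- Pre_ excludes inputs where the Python A raises (missing 'word_ids'/'sep_indices' key: KeyError;
-- a nonzero sep entry at an index ≥ len(word_ids): IndexError on the matrix write), and association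
-- lists with duplicate keys, on which the Python-dict value (last occurrence wins) differs from the
-- assoc-list first-match convention the ports use — a defensible-corner modelling ambiguity.
def Pre_build_memory_update_mask (data : List (String × List Int)) : Prop :=
  (data.map Prod.fst).Nodup ∧
  (List.lookup "word_ids" data).isSome = true ∧
  (List.lookup "sep_indices" data).isSome = true ∧
  ∀ j < ((List.lookup "sep_indices" data).getD []).length,
    ((List.lookup "sep_indices" data).getD []).getD j 0 ≠ 0 →
    j < ((List.lookup "word_ids" data).getD []).length
instance (data : List (String × List Int)) : Decidable (Pre_build_memory_update_mask data) := by
  unfold Pre_build_memory_update_mask; infer_instance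

def pvWitness_build_memory_update_mask : (List (String × List Int)) :=
  [("word_ids", [5, 6, 7]), ("sep_indices", [1, 0, 1])]

def Spec_build_memory_update_mask (data : List (String × List Int)) (out : List (List Int)) : Prop := out = build_memory_update_mask_alt data
instance (data : List (String × List Int)) (out : List (List Int)) : Decidable (Spec_build_memory_update_mask data out) := by unfold Spec_build_memory_update_mask; infer_instance

-- ===== CLAIM (what is proved, stated in full; the proofs are below) =====
def Claim_equal_build_memory_update_mask : Prop := ∀ (data : List (String × List Int)), Dom_build_memory_update_mask data → Pre_build_memory_update_mask data → Spec_build_memory_update_mask data (build_memory_update_mask data)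

-- ===== LEMMAS AND PROOFS =====

-- B's break loop is a fold over the prefix of rows < j
theorem bmumInner_eq_foldl (j : Nat) (active : List Nat) (m : List (List Int)) :
    bmumInner j active m
      = (active.takeWhile (fun i => decide (i < j))).foldl (fun m i => bmumSet m i j) m := by
  induction active generalizing m with
  | nil => rfl
  | cons i rest ih =>
      by_cases h : i < j
      · simp [bmumInner, h, Nat.not_le.mpr h, ih]
      · simp [bmumInner, h, Nat.le_of_not_lt h]

-- fold with a guard = fold over the filtered list
theorem foldl_guard_eq_filter {α β : Type} (p : α → Bool) (f : β → α → β) (l : List α) (init : β) :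
    l.foldl (fun b a => if p a then f b a else b) init = (l.filter p).foldl f init := by
  induction l generalizing init with
  | nil => rfl
  | cons a t ih =>
      by_cases h : p a
      · simp [h, ih]
      · simp [h, ih]

-- takeWhile = filter on a strictly increasing list
theorem takeWhile_lt_eq_filter_of_sorted (j : Nat) :
    ∀ (l : List Nat), l.Pairwise (· < ·) →
      l.takeWhile (fun i => decide (i < j)) = l.filter (fun i => decide (i < j)) := by
  intro l hl
  induction l with
  | nil => rfl
  | cons a t ih =>
      rcases List.pairwise_cons.mp hl with ⟨ha, ht⟩
      by_cases h : a < j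
      · simp [h, ih ht]
      · simp only [List.takeWhile_cons, List.filter_cons, h, decide_false]
        simp only [Bool.false_eq_true, if_false]
        symm
        exact List.filter_eq_nil_iff.mpr (fun x hx => by
          have := ha x hx; simp; omega)

-- the prefix of range N below j is range j
theorem filter_lt_range (j N : Nat) (h : j ≤ N) :
    (List.range N).filter (fun i => decide (i < j)) = List.range j := by
  induction N with
  | zero => simpa [Nat.le_zero.mp h]
  | succ N ih =>
      rcases Nat.lt_or_ge j (N + 1) with hj | hj
      · have hjN : j ≤ N := Nat.lt_succ_iff.mp hj
        rw [List.range_succ, List.filter_append, ih hjN]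
        simp [Nat.not_lt.mpr hjN]
      · have : j = N + 1 := Nat.le_antisymm h hj
        subst this
        exact List.filter_eq_self.mpr (fun x hx => by
          have := List.mem_range.mp hx; simp; omega)

-- the sorted active list cut at j is exactly the filtered range j
theorem takeWhile_filter_range (q : Nat → Bool) (j N : Nat) (h : j ≤ N) :
    ((List.range N).filter q).takeWhile (fun i => decide (i < j))
      = (List.range j).filter q := by
  rw [takeWhile_lt_eq_filter_of_sorted j _
        (List.Pairwise.sublist List.filter_sublist List.pairwise_lt_range)]
  rw [List.filter_comm, filter_lt_range j N h]

-- ===== VERDICT (by name: the statement is the Claim_ definition above) =====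
theorem build_memory_update_mask_spec : Claim_equal_build_memory_update_mask := by
  intro data _ _
  unfold Spec_build_memory_update_mask build_memory_update_mask build_memory_update_mask_alt
  simp only
  apply List.foldl_ext
  intro m j hj
  have hjN : j < ((List.lookup "sep_indices" data).getD []).length := List.mem_range.mp hj
  by_cases h : ((List.lookup "sep_indices" data).getD []).getD j 0 = 0
  · rw [if_pos (by simpa using h), if_neg (by simpa using h)]
  · rw [if_neg (by simpa using h), if_pos (by simpa using h)]
    rw [bmumInner_eq_foldl, takeWhile_filter_range _ j _ (Nat.le_of_lt hjN),
        ← foldl_guard_eq_filter]
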